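-- pv_equiv track=rewrite | github.com/BjornAhmark/robotframework | src/robot/running/librarykeywordrunner.py | _get_run_kws_calls
-- ===== SOURCE A (Python) =====
-- def _get_run_kws_calls(given_args):
--     if 'AND' not in given_args:
--         for kw_call in given_args:
--             yield [kw_call,]
--     else:
--         while 'AND' in given_args:
--             index = list(given_args).index('AND')
--             kw_call, given_args = given_args[:index], given_args[index + 1:]
--             yield kw_call
--         if given_args:
--             yield given_args
-- ===== SOURCE B (Python) =====
-- def _get_run_kws_calls(given_args):
--     if 'AND' not in given_args:
--         for kw_call in given_args:
--             yield [kw_call]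
--     else:
--         # Build the groups in ONE backward pass instead of repeated index()+slicing.
--         groups = []
--         for x in reversed(given_args):
--             if x == 'AND':
--                 groups.insert(0, [])
--             elif groups:
--                 groups[0].insert(0, x)
--             else:
--                 groups = [[x]]
--         yield from groups
-- ===== Notes on version B (the rewrite author's own statement) =====
-- stated objective: simpler
-- what changed: A repeatedly searches for 'AND' with index() and re-slices the remaining list; B builds all groups in one backward pass over the list with an accumulator (the no-'AND' branch is kept as-is).
import Mathlib
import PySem

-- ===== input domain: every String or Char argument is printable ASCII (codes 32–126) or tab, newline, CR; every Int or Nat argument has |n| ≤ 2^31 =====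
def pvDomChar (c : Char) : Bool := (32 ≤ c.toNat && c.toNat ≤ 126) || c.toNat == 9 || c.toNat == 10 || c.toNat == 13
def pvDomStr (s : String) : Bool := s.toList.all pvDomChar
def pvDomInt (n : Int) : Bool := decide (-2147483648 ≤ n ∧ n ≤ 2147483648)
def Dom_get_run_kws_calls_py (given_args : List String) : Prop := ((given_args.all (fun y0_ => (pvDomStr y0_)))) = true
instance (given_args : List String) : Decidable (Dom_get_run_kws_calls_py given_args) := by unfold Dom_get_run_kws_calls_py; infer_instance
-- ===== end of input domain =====

-- B replaces A's repeated index('AND')+slice while-loop by a single backward pass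
-- that builds the groups with an accumulator (objective: simpler, one pass).

-- ===== PORT A =====
-- the 'while "AND" in given_args' loop plus the trailing 'if given_args: yield given_args'
def pvALoop (xs : List String) : List (List String) :=
  if h : "AND" ∈ xs then
    xs.take ((PySem.List.index? xs "AND").getD 0) ::
      pvALoop (xs.drop ((PySem.List.index? xs "AND").getD 0 + 1))
  else if xs = [] then [] else [xs]
termination_by xs.length
decreasing_by
  have hne : xs ≠ [] := by rintro rfl; simp at h
  have : 0 < xs.length := List.length_pos_iff.mpr hne
  simp only [List.length_drop]; omega

def get_run_kws_calls_py (given_args : List String) : List (List String) :=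
  if "AND" ∉ given_args then given_args.map (fun kw_call => [kw_call])
  else pvALoop given_args

-- ===== PORT B =====
-- one step of B's backward pass (the body of 'for x in reversed(given_args)')
def pvAltStep (x : String) (groups : List (List String)) : List (List String) :=
  if x = "AND" then [] :: groups
  else
    match groups with
    | [] => [[x]]
    | g :: gs => (x :: g) :: gs

def get_run_kws_calls_py_alt (given_args : List String) : List (List String) :=
  if "AND" ∉ given_args then given_args.map (fun kw_call => [kw_call])
  else given_args.foldr pvAltStep []

-- ===== PRECONDITION & SPEC =====
def Spec_get_run_kws_calls_py (given_args : List String) (out : List (List String)) : Prop := out = get_run_kws_calls_py_alt given_args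
instance (given_args : List String) (out : List (List String)) : Decidable (Spec_get_run_kws_calls_py given_args out) := by unfold Spec_get_run_kws_calls_py; infer_instance

-- ===== CLAIM (what is proved, stated in full; the proofs are below) =====
def Claim_equal_get_run_kws_calls_py : Prop := ∀ (given_args : List String), Dom_get_run_kws_calls_py given_args → Spec_get_run_kws_calls_py given_args (get_run_kws_calls_py given_args)

-- ===== LEMMAS AND PROOFS =====

-- B's pass consumes an "AND"-free prefix by prepending it onto the current first group
theorem pvFoldr_no_and_cons (p : List String) (hp : "AND" ∉ p) (g : List String)
    (gs : List (List String)) : p.foldr pvAltStep (g :: gs) = (p ++ g) :: gs := by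
  induction p with
  | nil => simp
  | cons x p ih =>
    have hx : x ≠ "AND" := by intro h; exact hp (h ▸ List.mem_cons_self)
    have hp' : "AND" ∉ p := fun h => hp (List.mem_cons_of_mem _ h)
    simp [List.foldr_cons, ih hp', pvAltStep, hx]

-- on an "AND"-free list B's pass yields nothing or the whole list as one group
theorem pvFoldr_no_and (p : List String) (hp : "AND" ∉ p) :
    p.foldr pvAltStep [] = if p = [] then [] else [p] := by
  induction p with
  | nil => simp
  | cons x p ih =>
    have hx : x ≠ "AND" := by intro h; exact hp (h ▸ List.mem_cons_self)
    have hp' : "AND" ∉ p := fun h => hp (List.mem_cons_of_mem _ h)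
    rw [List.foldr_cons, ih hp']
    by_cases h0 : p = []
    · subst h0; simp [pvAltStep, hx]
    · simp [pvAltStep, hx, h0]

-- A's while-loop equals B's single backward pass, on any list
theorem pvALoop_eq_foldr (xs : List String) : pvALoop xs = xs.foldr pvAltStep [] := by
  induction xs using pvALoop.induct with
  | case1 xs h ih =>
    obtain ⟨k, hk⟩ := Option.isSome_iff_exists.mp
      ((PySem.List.index?_isSome_iff (xs := xs) (v := "AND")).mpr h)
    obtain ⟨pre, suf, hsplit, hlen, hnot⟩ := (PySem.List.index?_eq_some_iff _ _ _).mp hk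
    subst hsplit hlen
    have hg : (PySem.List.index? (pre ++ "AND" :: suf) "AND").getD 0 = pre.length := by
      rw [hk]; rfl
    have htake : (pre ++ "AND" :: suf).take pre.length = pre := by
      simp
    have hdrop : (pre ++ "AND" :: suf).drop (pre.length + 1) = suf := by
      simp
    rw [hg, hdrop] at ih
    rw [pvALoop, dif_pos h, hg, htake, hdrop, ih]
    rw [List.foldr_append]
    simp only [List.foldr_cons, pvAltStep, if_true]
    rw [pvFoldr_no_and_cons pre hnot ([]) _]
    simp
  | case2 =>
    rw [pvALoop]
    simp
  | case3 xs h hne =>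
    rw [pvALoop, dif_neg h, pvFoldr_no_and xs h]

-- ===== VERDICT (by name: the statement is the Claim_ definition above) =====
theorem get_run_kws_calls_py_spec : Claim_equal_get_run_kws_calls_py := by
  intro g _
  unfold Spec_get_run_kws_calls_py get_run_kws_calls_py get_run_kws_calls_py_alt
  by_cases h : "AND" ∈ g
  · simp [h, pvALoop_eq_foldr]
  · simp [h]
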